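-- pv_equiv track=rewrite | github.com/onestone11/kosa-study-tigger | 엄마호랑이반/8주차 문제/최혜령/석유시추.py | solution
-- ===== SOURCE A (Python) =====
-- def solution(land):
--     n, m = len(land), len(land[0])
--
--     # 각 열의 석유량을 저장할 배열
--     column_oil = [0] * m
--
--     # 방문 체크를 위한 배열
--     visited = [[False] * m for _ in range(n)]
--
--     # BFS로 석유 그룹 크기와 속한 열 찾기
--     def bfs(x, y):
--         # 그룹에 포함된 열을 저장할 집합
--         columns = set([y])
--         # 그룹의 크기
--         size = 0
--
--         queue = [(x, y)]
--         visited[x][y] = True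
--
--         while queue:
--             cx, cy = queue.pop(0)
--             size += 1
--
--             # 4방향 탐색
--             for dx, dy in [(1,0), (-1,0), (0,1), (0,-1)]:
--                 nx, ny = cx + dx, cy + dy
--                 # 범위 체크, 석유 존재 체크, 방문 여부 체크
--                 if (0 <= nx < n and 0 <= ny < m and
--                     land[nx][ny] == 1 and not visited[nx][ny]):
--                     queue.append((nx, ny))
--                     visited[nx][ny] = True
--                     columns.add(ny)
--
--         return size, columns
--
--     # 모든 석유 그룹 탐색
--     for i in range(n):
--         for j in range(m):
--             if land[i][j] == 1 and not visited[i][j]: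
--                 group_size, group_columns = bfs(i, j)
--
--                 # 그룹의 각 열에 석유량 누적
--                 for col in group_columns:
--                     column_oil[col] += group_size
--
--     # 최대 석유량 반환
--     return max(column_oil)
-- ===== SOURCE B (Python) =====
-- def solution(land):
--     n, m = len(land), len(land[0])
--     # iterative DFS (explicit stack) with a set of seen cells; per-column totals in a dict
--     seen = set()
--     total = {c: 0 for c in range(m)}
--     for i in range(n):
--         for j in range(m):
--             if land[i][j] == 1 and (i, j) not in seen:
--                 seen.add((i, j))
--                 stack = [(i, j)]
--                 comp = []
--                 while stack:
--                     x, y = stack.pop()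
--                     comp.append((x, y))
--                     for nx, ny in ((x + 1, y), (x - 1, y), (x, y + 1), (x, y - 1)):
--                         if 0 <= nx < n and 0 <= ny < m and (nx, ny) not in seen and land[nx][ny] == 1:
--                             seen.add((nx, ny))
--                             stack.append((nx, ny))
--                 size = len(comp)
--                 for c in {y for _, y in comp}:
--                     total[c] += size
--     return max(total.values())
-- ===== Notes on version B (the rewrite author's own statement) =====
-- stated objective: alternative
-- what changed: Replaces the pop(0)-queue BFS over a 2D boolean visited matrix and a per-column list by an explicit-stack DFS over a set of seen cells, collecting each component's cells first and accumulating per-column totals in a dict keyed by column.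
import Mathlib
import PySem

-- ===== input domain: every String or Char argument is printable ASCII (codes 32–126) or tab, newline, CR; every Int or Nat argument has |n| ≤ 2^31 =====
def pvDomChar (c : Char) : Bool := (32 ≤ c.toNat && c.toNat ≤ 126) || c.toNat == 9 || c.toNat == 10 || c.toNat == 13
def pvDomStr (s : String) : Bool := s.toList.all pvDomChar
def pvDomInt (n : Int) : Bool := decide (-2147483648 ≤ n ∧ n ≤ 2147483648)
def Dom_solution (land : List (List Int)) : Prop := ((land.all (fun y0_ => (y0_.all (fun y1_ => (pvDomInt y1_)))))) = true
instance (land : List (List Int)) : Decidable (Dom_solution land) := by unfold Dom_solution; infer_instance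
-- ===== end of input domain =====

-- B replaces A's pop(0)-queue BFS over a boolean visited matrix by an explicit-stack DFS
-- over a set of seen cells, deriving each component's size and column set from the collected
-- cell list and accumulating per-column totals in a dict (objective: alternative algorithm;
-- equal return value on every input satisfying Pre_solution).

-- shared grid accessor: land[x][y] (total; guarded in-range at every use)
def landCell (land : List (List Int)) (x y : Int) : Int :=
  PySem.List.pyGetD (PySem.List.pyGetD land x []) y 0

-- ===== PORT A =====
def vGetA (vis : List (List Bool)) (x y : Int) : Bool :=
  PySem.List.pyGetD (PySem.List.pyGetD vis x []) y false

def vSetA (vis : List (List Bool)) (x y : Int) : List (List Bool) :=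
  PySem.List.pySetD vis x (PySem.List.pySetD (PySem.List.pyGetD vis x []) y true)

def dirsA : List (Int × Int) := [(1,0),(-1,0),(0,1),(0,-1)]

def bfsStepA (land : List (List Int)) (n m cx cy : Int)
    (st : List (Int × Int) × List (List Bool) × PySem.Set Int) (d : Int × Int) :
    List (Int × Int) × List (List Bool) × PySem.Set Int :=
  let nx := cx + d.1
  let ny := cy + d.2
  if 0 ≤ nx ∧ nx < n ∧ 0 ≤ ny ∧ ny < m ∧ landCell land nx ny = 1 ∧ vGetA st.2.1 nx ny = false
  then (st.1 ++ [(nx, ny)], vSetA st.2.1 nx ny, PySem.Set.add st.2.2 ny)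
  else st

def bfsLoopA (land : List (List Int)) (n m : Int) :
    Nat → List (Int × Int) → List (List Bool) → Int → PySem.Set Int →
    Int × PySem.Set Int × List (List Bool)
  | 0, _, vis, size, cols => (size, cols, vis)
  | _ + 1, [], vis, size, cols => (size, cols, vis)
  | fuel + 1, c :: rest, vis, size, cols =>
      let st := dirsA.foldl (bfsStepA land n m c.1 c.2) (rest, vis, cols)
      bfsLoopA land n m fuel st.1 st.2.1 (size + 1) st.2.2

def bfsA (land : List (List Int)) (n m x y : Int) (vis : List (List Bool)) :
    Int × PySem.Set Int × List (List Bool) :=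
  bfsLoopA land n m (5 * (land.length * m.toNat) + 1) [(x, y)] (vSetA vis x y) 0
    (PySem.Set.ofList [y])

def cellLoopA (land : List (List Int)) (n m i : Int)
    (st : List Int × List (List Bool)) (j : Int) : List Int × List (List Bool) :=
  if landCell land i j = 1 ∧ vGetA st.2 i j = false then
    let r := bfsA land n m i j st.2
    let co := r.2.1.foldl
      (fun co col => PySem.List.pySetD co col (PySem.List.pyGetD co col 0 + r.1)) st.1
    (co, r.2.2)
  else st

def solution (land : List (List Int)) : Int :=
  let n : Int := land.length
  let m : Int := (PySem.List.pyGetD land 0 []).length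
  let init : List Int × List (List Bool) :=
    (List.replicate m.toNat 0, List.replicate n.toNat (List.replicate m.toNat false))
  let fin := (PySem.List.pyRange 0 n 1).foldl
    (fun st i => (PySem.List.pyRange 0 m 1).foldl (cellLoopA land n m i) st) init
  (PySem.List.max? fin.1 (fun v => v)).getD 0

-- ===== PORT B =====
def nbrsB (x y : Int) : List (Int × Int) := [(x + 1, y), (x - 1, y), (x, y + 1), (x, y - 1)]

def dfsStepB (land : List (List Int)) (n m : Int)
    (st : List (Int × Int) × PySem.Set (Int × Int)) (c : Int × Int) :
    List (Int × Int) × PySem.Set (Int × Int) :=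
  if 0 ≤ c.1 ∧ c.1 < n ∧ 0 ≤ c.2 ∧ c.2 < m ∧ PySem.Set.contains st.2 c = false ∧
      landCell land c.1 c.2 = 1
  then (st.1 ++ [c], PySem.Set.add st.2 c)
  else st

def dfsLoopB (land : List (List Int)) (n m : Int) :
    Nat → List (Int × Int) → PySem.Set (Int × Int) → List (Int × Int) →
    List (Int × Int) × PySem.Set (Int × Int)
  | 0, _, seen, comp => (comp, seen)
  | _ + 1, [], seen, comp => (comp, seen)
  | fuel + 1, s :: ss, seen, comp =>
      let c := (s :: ss).getLast (List.cons_ne_nil s ss)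
      let rest := (s :: ss).dropLast
      let st := (nbrsB c.1 c.2).foldl (dfsStepB land n m) (rest, seen)
      dfsLoopB land n m fuel st.1 st.2 (comp ++ [c])

def cellLoopB (land : List (List Int)) (n m i : Int)
    (st : PySem.Dict Int Int × PySem.Set (Int × Int)) (j : Int) :
    PySem.Dict Int Int × PySem.Set (Int × Int) :=
  if landCell land i j = 1 ∧ PySem.Set.contains st.2 (i, j) = false then
    let r := dfsLoopB land n m (5 * (land.length * m.toNat) + 1) [(i, j)]
      (PySem.Set.add st.2 (i, j)) []
    let size : Int := r.1.length
    let cols := PySem.Set.ofList (r.1.map Prod.snd)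
    let total := cols.foldl (fun d col => d.modify col 0 (· + size)) st.1
    (total, r.2)
  else st

def solution_alt (land : List (List Int)) : Int :=
  let n : Int := land.length
  let m : Int := (PySem.List.pyGetD land 0 []).length
  let total0 := (PySem.List.pyRange 0 m 1).foldl (fun d c => d.insert c 0) PySem.Dict.empty
  let fin := (PySem.List.pyRange 0 n 1).foldl
    (fun st i => (PySem.List.pyRange 0 m 1).foldl (cellLoopB land n m i) st)
    (total0, PySem.Set.empty)
  (PySem.List.max? fin.1.values (fun v => v)).getD 0


-- ===== PRECONDITION & SPEC =====
-- Pre_solution: exactly the inputs where Python A returns normally: a non-empty grid whose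
-- first row is non-empty and no row shorter than the first (on every other input A raises
-- an IndexError or ValueError, and B raises likewise).
def Pre_solution (land : List (List Int)) : Prop :=
  land ≠ [] ∧ 0 < (land.headI).length ∧ ∀ r ∈ land, (land.headI).length ≤ r.length
instance (land : List (List Int)) : Decidable (Pre_solution land) := by
  unfold Pre_solution; infer_instance

def pvWitness_solution : List (List Int) := ([[1]])

def Spec_solution (land : List (List Int)) (out : Int) : Prop := out = solution_alt land
instance (land : List (List Int)) (out : Int) : Decidable (Spec_solution land out) := by
  unfold Spec_solution; infer_instance

-- ===== CLAIM (what is proved, stated in full; the proofs are below) =====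
def Claim_equal_solution : Prop := ∀ (land : List (List Int)), Dom_solution land →
  Pre_solution land → Spec_solution land (solution land)

-- ===== LEMMAS AND PROOFS =====

def good (land : List (List Int)) (n m : Int) (c : Int × Int) : Bool :=
  decide (0 ≤ c.1 ∧ c.1 < n ∧ 0 ≤ c.2 ∧ c.2 < m ∧ landCell land c.1 c.2 = 1)

noncomputable def goodF (land : List (List Int)) (n m : Int) : Finset (Int × Int) :=
  (Finset.Ico 0 n ×ˢ Finset.Ico 0 m).filter (fun c => good land n m c = true)

lemma mem_goodF {land : List (List Int)} {n m : Int} {c : Int × Int} :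
    c ∈ goodF land n m ↔ good land n m c = true := by
  simp only [goodF, Finset.mem_filter, Finset.mem_product, Finset.mem_Ico, good,
    decide_eq_true_iff]
  tauto

lemma card_goodF_le (land : List (List Int)) (n m : Int) :
    (goodF land n m).card ≤ n.toNat * m.toNat := by
  calc (goodF land n m).card ≤ ((Finset.Ico (0:Int) n) ×ˢ (Finset.Ico (0:Int) m)).card :=
        Finset.card_filter_le _ _
    _ = n.toNat * m.toNat := by
        rw [Finset.card_product, Int.card_Ico, Int.card_Ico]; simp

def Shaped (n m : Int) (vis : List (List Bool)) : Prop :=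
  vis.length = n.toNat ∧ ∀ row ∈ vis, row.length = m.toNat

noncomputable def mset (land : List (List Int)) (n m : Int) (vis : List (List Bool)) :
    Finset (Int × Int) :=
  (goodF land n m).filter (fun c => vGetA vis c.1 c.2 = true)

lemma mem_mset {land : List (List Int)} {n m : Int} {vis : List (List Bool)} {c : Int × Int} :
    c ∈ mset land n m vis ↔ good land n m c = true ∧ vGetA vis c.1 c.2 = true := by
  simp [mset, Finset.mem_filter, mem_goodF]

lemma mset_subset_goodF {land : List (List Int)} {n m : Int} {vis : List (List Bool)} :
    mset land n m vis ⊆ goodF land n m := Finset.filter_subset _ _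

lemma Shaped_vSetA {n m : Int} {vis : List (List Bool)} (hsh : Shaped n m vis)
    {x y : Int} (hx : 0 ≤ x) (hxn : x < n) : Shaped n m (vSetA vis x y) := by
  obtain ⟨h1, h2⟩ := hsh
  refine ⟨by simp [vSetA, PySem.List.length_pySetD, h1], ?_⟩
  intro row hrow
  rw [vSetA, PySem.List.pySetD_of_nonneg _ _ hx] at hrow
  rcases List.mem_or_eq_of_mem_set hrow with h | h
  · exact h2 row h
  · subst h
    have hxl : x.toNat < vis.length := by omega
    rw [PySem.List.length_pySetD, PySem.List.pyGetD_of_nonneg _ _ hx,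
        List.getD_eq_getElem?_getD, List.getElem?_eq_getElem hxl]
    simpa using h2 _ (List.getElem_mem hxl)

lemma getD_set_helper {α : Type} (l : List α) (i j : Nat) (v : α) (d : α) :
    (l.set i v).getD j d = if j = i ∧ i < l.length then v else l.getD j d := by
  simp only [List.getD_eq_getElem?_getD, List.getElem?_set]
  by_cases h : i = j
  · subst h
    by_cases h2 : i < l.length
    · simp [h2]
    · simp [h2, List.getElem?_eq_none (by omega : l.length ≤ i)]
  · have : ¬(j = i ∧ i < l.length) := fun hh => h hh.1.symm
    simp [h, this]

lemma vGetA_vSetA {n m : Int} {vis : List (List Bool)} (hsh : Shaped n m vis)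
    {x y a b : Int} (hx : 0 ≤ x) (hxn : x < n) (hy : 0 ≤ y) (hym : y < m)
    (ha : 0 ≤ a) (hb : 0 ≤ b) :
    vGetA (vSetA vis x y) a b = if a = x ∧ b = y then true else vGetA vis a b := by
  obtain ⟨h1, h2⟩ := hsh
  have hxl : x.toNat < vis.length := by omega
  have hrlen : (vis.getD x.toNat []).length = m.toNat := by
    rw [List.getD_eq_getElem?_getD, List.getElem?_eq_getElem hxl]
    exact h2 _ (by simpa using List.getElem_mem hxl)
  rw [vGetA, vGetA, vSetA, PySem.List.pySetD_of_nonneg _ _ hx,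
    PySem.List.pySetD_of_nonneg _ _ hy, PySem.List.pyGetD_of_nonneg _ _ hx,
    PySem.List.pyGetD_of_nonneg _ _ ha, PySem.List.pyGetD_of_nonneg _ _ ha,
    PySem.List.pyGetD_of_nonneg _ _ hb, PySem.List.pyGetD_of_nonneg _ _ hb,
    getD_set_helper]
  by_cases hax : a = x
  · subst hax
    rw [if_pos ⟨rfl, by omega⟩, getD_set_helper]
    by_cases hby : b = y
    · subst hby
      rw [if_pos ⟨rfl, by omega⟩, if_pos ⟨rfl, rfl⟩]
    · have h5 : ¬(b.toNat = y.toNat ∧ y.toNat < (vis.getD a.toNat []).length) := by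
        intro hh; exact hby (by omega)
      have h4 : ¬(a = a ∧ b = y) := fun hh => hby hh.2
      rw [if_neg h5, if_neg h4]
  · have h3 : ¬(a.toNat = x.toNat ∧ x.toNat < vis.length) := by
      intro hh; exact hax (by omega)
    have h4 : ¬(a = x ∧ b = y) := fun hh => hax hh.1
    rw [if_neg h3, if_neg h4]

lemma mset_vSetA {land : List (List Int)} {n m : Int} {vis : List (List Bool)}
    (hsh : Shaped n m vis) {x y : Int} (hg : good land n m (x, y) = true) :
    mset land n m (vSetA vis x y) = insert (x, y) (mset land n m vis) := by
  have hb := (decide_eq_true_iff).mp hg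
  ext c
  simp only [mem_mset, Finset.mem_insert]
  by_cases hgc : good land n m c = true
  · have hbc := (decide_eq_true_iff).mp hgc
    rw [vGetA_vSetA hsh hb.1 hb.2.1 hb.2.2.1 hb.2.2.2.1 hbc.1 hbc.2.2.1]
    by_cases hc : c = (x, y)
    · subst hc; simp_all
    · have : ¬(c.1 = x ∧ c.2 = y) := by
        intro ⟨u, v⟩; exact hc (Prod.ext u v)
      simp [this, hc, hgc]
    
  · have hxy : c ≠ (x, y) := by rintro rfl; exact hgc hg
    simp [hgc, hxy]

lemma map_toFinset {α β : Type} [DecidableEq α] [DecidableEq β] (l : List α) (f : α → β) :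
    (l.map f).toFinset = l.toFinset.image f := by ext b; simp

lemma setAdd_nodup {α : Type} [BEq α] [LawfulBEq α] (s : PySem.Set α) (x : α)
    (h : s.Nodup) : (PySem.Set.add s x).Nodup := by
  by_cases hx : x ∈ s
  · simpa [PySem.Set.add, PySem.Set.contains, hx] using h
  · simp only [PySem.Set.add, PySem.Set.contains, List.contains_iff_mem, hx]
    simp only [decide_false, if_false]
    rw [List.nodup_append]
    refine ⟨h, List.nodup_singleton x, ?_⟩
    intro a ha b hb
    rw [List.mem_singleton] at hb; subst hb
    exact fun heq => hx (heq ▸ ha)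

lemma setAdd_toFinset {α : Type} [BEq α] [LawfulBEq α] [DecidableEq α] (s : PySem.Set α)
    (x : α) : (PySem.Set.add s x).toFinset = insert x s.toFinset := by
  by_cases hx : x ∈ s
  · simp only [PySem.Set.add, PySem.Set.contains, List.contains_iff_mem, hx]
    simp only [decide_true, if_true]
    ext a; simp only [List.mem_toFinset, Finset.mem_insert]
    exact ⟨Or.inr, by rintro (rfl | hha); exacts [hx, hha]⟩
  · simp only [PySem.Set.add, PySem.Set.contains, List.contains_iff_mem, hx]
    simp only [decide_false, if_false]
    ext a; simp
    try tauto

lemma setContains_false_iff {α : Type} [BEq α] [LawfulBEq α] (s : PySem.Set α) (x : α) :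
    PySem.Set.contains s x = false ↔ x ∉ s := by
  simp [PySem.Set.contains]

lemma dirsA_map (c : Int × Int) :
    dirsA.map (fun δ : Int × Int => (c.1 + δ.1, c.2 + δ.2)) = nbrsB c.1 c.2 := by
  simp [dirsA, nbrsB]
  constructor <;> ring

def ReachStep (land : List (List Int)) (n m : Int) (M : Finset (Int × Int))
    (c d : Int × Int) : Prop :=
  d ∈ nbrsB c.1 c.2 ∧ good land n m d = true ∧ d ∉ M

def Reach (land : List (List Int)) (n m : Int) (M : Finset (Int × Int)) :
    Int × Int → Int × Int → Prop :=
  Relation.ReflTransGen (ReachStep land n m M)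

lemma Reach_mono {land : List (List Int)} {n m : Int} {M M' : Finset (Int × Int)}
    (h : M ⊆ M') {s c : Int × Int} (hr : Reach land n m M' s c) : Reach land n m M s c :=
  Relation.ReflTransGen.mono (fun _ _ hs => ⟨hs.1, hs.2.1, fun hm => hs.2.2 (h hm)⟩) hr

lemma foldStepA_spec (land : List (List Int)) (n m cx cy : Int) (ds : List (Int × Int))
    (q0 : List (Int × Int)) (vis0 : List (List Bool)) (cols0 : PySem.Set Int)
    (hsh : Shaped n m vis0) (hcols : cols0.Nodup) :
    ∃ new : List (Int × Int),
      (ds.foldl (bfsStepA land n m cx cy) (q0, vis0, cols0)).1 = q0 ++ new ∧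
      Shaped n m (ds.foldl (bfsStepA land n m cx cy) (q0, vis0, cols0)).2.1 ∧
      new.Nodup ∧
      (∀ d ∈ new, (∃ δ ∈ ds, d = (cx + δ.1, cy + δ.2)) ∧ good land n m d = true ∧
        d ∉ mset land n m vis0) ∧
      mset land n m (ds.foldl (bfsStepA land n m cx cy) (q0, vis0, cols0)).2.1
        = mset land n m vis0 ∪ new.toFinset ∧
      (∀ δ ∈ ds, good land n m (cx + δ.1, cy + δ.2) = true →
        (cx + δ.1, cy + δ.2) ∈ mset land n m
          (ds.foldl (bfsStepA land n m cx cy) (q0, vis0, cols0)).2.1) ∧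
      (ds.foldl (bfsStepA land n m cx cy) (q0, vis0, cols0)).2.2.Nodup ∧
      (ds.foldl (bfsStepA land n m cx cy) (q0, vis0, cols0)).2.2.toFinset
        = cols0.toFinset ∪ (new.map Prod.snd).toFinset := by
  induction ds generalizing q0 vis0 cols0 with
  | nil => exact ⟨[], by simp, hsh, by simp, by simp, by simp, by simp, hcols, by simp⟩
  | cons δ t ih =>
    simp only [List.foldl_cons]
    by_cases hcond : 0 ≤ cx + δ.1 ∧ cx + δ.1 < n ∧ 0 ≤ cy + δ.2 ∧ cy + δ.2 < m ∧
        landCell land (cx + δ.1) (cy + δ.2) = 1 ∧ vGetA vis0 (cx + δ.1) (cy + δ.2) = false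
    · have hstep : bfsStepA land n m cx cy (q0, vis0, cols0) δ =
          (q0 ++ [(cx + δ.1, cy + δ.2)], vSetA vis0 (cx + δ.1) (cy + δ.2),
            PySem.Set.add cols0 (cy + δ.2)) := by
        simp only [bfsStepA]; rw [if_pos hcond]
      rw [hstep]
      set d : Int × Int := (cx + δ.1, cy + δ.2) with hd
      have hgd : good land n m d = true := by
        simp only [good, hd, decide_eq_true_iff]
        exact ⟨hcond.1, hcond.2.1, hcond.2.2.1, hcond.2.2.2.1, hcond.2.2.2.2.1⟩
      have hnotm : d ∉ mset land n m vis0 := by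
        rw [mem_mset]; rintro ⟨-, hv⟩
        simp only [hd] at hv
        rw [hcond.2.2.2.2.2] at hv
        cases hv
      have hsh1 : Shaped n m (vSetA vis0 d.1 d.2) :=
        Shaped_vSetA hsh hcond.1 hcond.2.1
      have hm1 : mset land n m (vSetA vis0 d.1 d.2) = insert d (mset land n m vis0) := by
        have := mset_vSetA (land := land) hsh (x := d.1) (y := d.2) (by simpa using hgd)
        simpa using this
      obtain ⟨new', h1, h2, h3, h4, h5, h6, h7, h8⟩ :=
        ih (q0 ++ [d]) (vSetA vis0 d.1 d.2) (PySem.Set.add cols0 d.2) hsh1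
          (setAdd_nodup cols0 d.2 hcols)
      refine ⟨d :: new', ?_, h2, ?_, ?_, ?_, ?_, h7, ?_⟩
      · simpa [List.append_assoc] using h1
      · refine List.nodup_cons.mpr ⟨fun hmem => ?_, h3⟩
        have := (h4 d hmem).2.2
        rw [hm1] at this
        exact this (Finset.mem_insert_self _ _)
      · intro d' hd'
        rcases List.mem_cons.mp hd' with rfl | hd''
        · exact ⟨⟨δ, List.mem_cons_self, rfl⟩, hgd, hnotm⟩
        · obtain ⟨⟨δ', hδ', hdd⟩, hg', hnm'⟩ := h4 d' hd''
          refine ⟨⟨δ', List.mem_cons_of_mem _ hδ', hdd⟩, hg', fun hm => ?_⟩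
          exact hnm' (by rw [hm1]; exact Finset.mem_insert_of_mem hm)
      · rw [h5, hm1]; ext a; simp; try tauto
      · intro δ' hδ' hg'
        rcases List.mem_cons.mp hδ' with rfl | hδ''
        · rw [h5, hm1]
          exact Finset.mem_union_left _ (Finset.mem_insert_self _ _)
        · exact h6 δ' hδ'' hg'
      · rw [h8, setAdd_toFinset]; ext a; simp; try tauto
    · have hstep : bfsStepA land n m cx cy (q0, vis0, cols0) δ = (q0, vis0, cols0) := by
        simp only [bfsStepA]; rw [if_neg hcond]
      rw [hstep]
      obtain ⟨new', h1, h2, h3, h4, h5, h6, h7, h8⟩ := ih q0 vis0 cols0 hsh hcols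
      refine ⟨new', h1, h2, h3, ?_, h5, ?_, h7, h8⟩
      · intro d' hd'
        obtain ⟨⟨δ', hδ', hdd⟩, hg', hnm'⟩ := h4 d' hd'
        exact ⟨⟨δ', List.mem_cons_of_mem _ hδ', hdd⟩, hg', hnm'⟩
      · intro δ' hδ' hg'
        rcases List.mem_cons.mp hδ' with rfl | hδ''
        · -- the guard failed but the cell is good: it must be already visited
          have hb := (decide_eq_true_iff).mp hg'
          have hv : vGetA vis0 (cx + δ'.1) (cy + δ'.2) = true := by
            rcases Bool.eq_false_or_eq_true (vGetA vis0 (cx + δ'.1) (cy + δ'.2)) with hvt | hvf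
            · exact hvt
            · exact absurd ⟨hb.1, hb.2.1, hb.2.2.1, hb.2.2.2.1, by simpa using hb.2.2.2.2, hvf⟩ hcond
          have : (cx + δ'.1, cy + δ'.2) ∈ mset land n m vis0 :=
            mem_mset.mpr ⟨hg', hv⟩
          rw [h5]; exact Finset.mem_union_left _ this
        · exact h6 δ' hδ'' hg'

lemma bfsLoopA_spec (land : List (List Int)) (n m : Int) (fuel : Nat)
    (q : List (Int × Int)) (vis : List (List Bool)) (size : Int) (cols : PySem.Set Int)
    (hsh : Shaped n m vis)
    (hqg : ∀ c ∈ q, good land n m c = true)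
    (hqm : ∀ c ∈ q, c ∈ mset land n m vis)
    (hqn : q.Nodup)
    (hcols : cols.Nodup)
    (hcl : ∀ c ∈ mset land n m vis, c ∉ q → ∀ d ∈ nbrsB c.1 c.2,
      good land n m d = true → d ∈ mset land n m vis)
    (hfuel : 5 * ((goodF land n m \ mset land n m vis).card) + q.length ≤ fuel) :
    Shaped n m (bfsLoopA land n m fuel q vis size cols).2.2 ∧
    mset land n m vis ⊆ mset land n m (bfsLoopA land n m fuel q vis size cols).2.2 ∧
    (∀ c ∈ mset land n m (bfsLoopA land n m fuel q vis size cols).2.2,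
      ∀ d ∈ nbrsB c.1 c.2, good land n m d = true →
        d ∈ mset land n m (bfsLoopA land n m fuel q vis size cols).2.2) ∧
    (∀ c ∈ mset land n m (bfsLoopA land n m fuel q vis size cols).2.2,
      c ∈ mset land n m vis ∨ ∃ s ∈ q, Reach land n m (mset land n m vis) s c) ∧
    (bfsLoopA land n m fuel q vis size cols).1 = size + q.length +
      (((mset land n m (bfsLoopA land n m fuel q vis size cols).2.2 \ mset land n m vis).card : Int)) ∧
    (bfsLoopA land n m fuel q vis size cols).2.1.Nodup ∧
    (bfsLoopA land n m fuel q vis size cols).2.1.toFinset = cols.toFinset ∪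
      (mset land n m (bfsLoopA land n m fuel q vis size cols).2.2 \ mset land n m vis).image Prod.snd := by
  induction fuel generalizing q vis size cols with
  | zero =>
      have hq : q = [] := List.eq_nil_of_length_eq_zero (by omega)
      subst hq
      simp only [bfsLoopA]
      refine ⟨hsh, Finset.Subset.refl _, ?_, fun c hc => Or.inl hc, by simp, hcols, by simp⟩
      intro c hc d hd hg
      exact hcl c hc (by simp) d hd hg
  | succ fuel ih =>
      match q with
      | [] =>
          simp only [bfsLoopA]
          refine ⟨hsh, Finset.Subset.refl _, ?_, fun c hc => Or.inl hc, by simp, hcols, by simp⟩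
          intro c hc d hd hg
          exact hcl c hc (by simp) d hd hg
      | c :: rest =>
          simp only [bfsLoopA]
          obtain ⟨new, h1, h2, h3, h4, h5, h6, h7, h8⟩ :=
            foldStepA_spec land n m c.1 c.2 dirsA rest vis cols hsh hcols
          set st := dirsA.foldl (bfsStepA land n m c.1 c.2) (rest, vis, cols) with hst
          rw [h1]
          have hMsub : mset land n m vis ⊆ mset land n m st.2.1 := by
            rw [h5]; exact Finset.subset_union_left
          have hnewM : ∀ d ∈ new, d ∈ mset land n m st.2.1 := by
            intro d hd; rw [h5]
            exact Finset.mem_union_right _ (List.mem_toFinset.mpr hd)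
          have hcM : c ∈ mset land n m st.2.1 := hMsub (hqm c List.mem_cons_self)
          -- nodup of rest ++ new
          have hqn' : (rest ++ new).Nodup := by
            rw [List.nodup_append]
            refine ⟨hqn.of_cons, h3, ?_⟩
            intro a ha b hb
            rintro rfl
            exact (h4 a hb).2.2 (hqm a (List.mem_cons_of_mem _ ha))
          -- card bookkeeping
          have hnsub : new.toFinset ⊆ goodF land n m \ mset land n m vis := by
            intro d hd
            rw [List.mem_toFinset] at hd
            exact Finset.mem_sdiff.mpr ⟨mem_goodF.mpr (h4 d hd).2.1, (h4 d hd).2.2⟩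
          have hsd : goodF land n m \ mset land n m st.2.1 =
              (goodF land n m \ mset land n m vis) \ new.toFinset := by
            rw [h5]; ext a
            simp only [Finset.mem_sdiff, Finset.mem_union, List.mem_toFinset]
            tauto
          have hcard : (goodF land n m \ mset land n m st.2.1).card + new.length =
              (goodF land n m \ mset land n m vis).card := by
            rw [hsd, Finset.card_sdiff, Finset.inter_eq_left.mpr hnsub,
              List.toFinset_card_of_nodup h3]
            have := Finset.card_le_card hnsub
            rw [List.toFinset_card_of_nodup h3] at this
            omega
          have hfuel' : 5 * ((goodF land n m \ mset land n m st.2.1).card) +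
              (rest ++ new).length ≤ fuel := by
            rw [List.length_append]
            have : (c :: rest).length = rest.length + 1 := by simp
            omega
          obtain ⟨g1, g2, g3, g4, g5, g6, g7⟩ :=
            ih (rest ++ new) st.2.1 (size + 1) st.2.2 h2
              (by
                intro d hd
                rcases List.mem_append.mp hd with hd | hd
                · exact hqg d (List.mem_cons_of_mem _ hd)
                · exact (h4 d hd).2.1)
              (by
                intro d hd
                rcases List.mem_append.mp hd with hd | hd
                · exact hMsub (hqm d (List.mem_cons_of_mem _ hd))
                · exact hnewM d hd)
              hqn'
              h7
              (by
                intro cM hcMm hcMq d hd hg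
                rw [h5] at hcMm
                rcases Finset.mem_union.mp hcMm with hcMm | hcMm
                · by_cases hcc : cM = c
                  · subst hcc
                    rw [← dirsA_map cM] at hd
                    have hd2 : ∃ a b, (a, b) ∈ dirsA ∧ (cM.1 + a, cM.2 + b) = d := by
                      simpa using hd
                    obtain ⟨δ1, δ2, hδ, rfl⟩ := hd2
                    exact h6 (δ1, δ2) hδ hg
                  · have hrest : cM ∉ c :: rest := by
                      intro hm
                      rcases List.mem_cons.mp hm with h | h
                      · exact hcc h
                      · exact hcMq (List.mem_append_left _ h)
                    exact hMsub (hcl cM hcMm hrest d hd hg)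
                · exact absurd (List.mem_append_right _ (List.mem_toFinset.mp hcMm)) hcMq)
              hfuel'
          have hnbr : ∀ d ∈ new, d ∈ nbrsB c.1 c.2 := by
            intro d hd
            obtain ⟨⟨δ, hδ, rfl⟩, -, -⟩ := h4 d hd
            rw [← dirsA_map c]
            exact List.mem_map.mpr ⟨δ, hδ, rfl⟩
          set MF := mset land n m (bfsLoopA land n m fuel (rest ++ new) st.2.1 (size + 1) st.2.2).2.2
            with hMF
          have hM1F : mset land n m st.2.1 ⊆ MF := g2
          -- decomposition of MF \ M0
          have hdecomp : MF \ mset land n m vis =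
              (MF \ mset land n m st.2.1) ∪ new.toFinset := by
            ext a
            simp only [Finset.mem_sdiff, Finset.mem_union, List.mem_toFinset]
            constructor
            · intro ⟨haF, ha0⟩
              by_cases hn : a ∈ new
              · exact Or.inr hn
              · refine Or.inl ⟨haF, fun hm => ?_⟩
                rw [h5] at hm
                rcases Finset.mem_union.mp hm with hm | hm
                · exact ha0 hm
                · exact hn (List.mem_toFinset.mp hm)
            · rintro (⟨haF, ha1⟩ | hn)
              · exact ⟨haF, fun hm => ha1 (hMsub hm)⟩
              · exact ⟨hM1F (hnewM a hn), (h4 a hn).2.2⟩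
          have hdisj : Disjoint (MF \ mset land n m st.2.1) new.toFinset := by
            rw [Finset.disjoint_right]
            intro a ha
            rw [List.mem_toFinset] at ha
            simp only [Finset.mem_sdiff, not_and, not_not]
            intro _
            exact hnewM a ha
          have hcard2 : (MF \ mset land n m vis).card =
              (MF \ mset land n m st.2.1).card + new.length := by
            rw [hdecomp, Finset.card_union_of_disjoint hdisj, List.toFinset_card_of_nodup h3]
          refine ⟨g1, fun a ha => hM1F (hMsub ha), g3, ?_, ?_, g6, ?_⟩
          · intro cF hcF
            rcases g4 cF hcF with hcF1 | ⟨s, hs, hreach⟩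
            · rw [h5] at hcF1
              rcases Finset.mem_union.mp hcF1 with h | h
              · exact Or.inl h
              · refine Or.inr ⟨c, List.mem_cons_self, ?_⟩
                rw [List.mem_toFinset] at h
                exact Relation.ReflTransGen.single
                  ⟨hnbr _ h, (h4 _ h).2.1, (h4 _ h).2.2⟩
            · have hreach0 : Reach land n m (mset land n m vis) s cF := Reach_mono hMsub hreach
              rcases List.mem_append.mp hs with hs | hs
              · exact Or.inr ⟨s, List.mem_cons_of_mem _ hs, hreach0⟩
              · refine Or.inr ⟨c, List.mem_cons_self, Relation.ReflTransGen.head ?_ hreach0⟩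
                exact ⟨hnbr _ hs, (h4 _ hs).2.1, (h4 _ hs).2.2⟩
          · rw [g5, hcard2]
            simp only [List.length_append, List.length_cons]
            push_cast
            ring
          · rw [g7, h8, hdecomp]
            rw [Finset.image_union]
            have : (new.map Prod.snd).toFinset = new.toFinset.image Prod.snd :=
              map_toFinset new Prod.snd
            rw [this]
            ext a
            simp only [Finset.mem_union]
            tauto

lemma foldStepB_spec (land : List (List Int)) (n m : Int) (ns : List (Int × Int))
    (q0 : List (Int × Int)) (seen0 : PySem.Set (Int × Int))
    (hnd : seen0.Nodup) (hsg : ∀ c ∈ seen0, good land n m c = true) :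
    ∃ new : List (Int × Int),
      (ns.foldl (dfsStepB land n m) (q0, seen0)).1 = q0 ++ new ∧
      (ns.foldl (dfsStepB land n m) (q0, seen0)).2.Nodup ∧
      (∀ c ∈ (ns.foldl (dfsStepB land n m) (q0, seen0)).2, good land n m c = true) ∧
      new.Nodup ∧
      (∀ d ∈ new, d ∈ ns ∧ good land n m d = true ∧ d ∉ seen0.toFinset) ∧
      (ns.foldl (dfsStepB land n m) (q0, seen0)).2.toFinset
        = seen0.toFinset ∪ new.toFinset ∧
      (∀ d ∈ ns, good land n m d = true →
        d ∈ (ns.foldl (dfsStepB land n m) (q0, seen0)).2.toFinset) := by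
  induction ns generalizing q0 seen0 with
  | nil => exact ⟨[], by simp, hnd, hsg, by simp, by simp, by simp, by simp⟩
  | cons d t ih =>
    simp only [List.foldl_cons]
    by_cases hcond : 0 ≤ d.1 ∧ d.1 < n ∧ 0 ≤ d.2 ∧ d.2 < m ∧
        PySem.Set.contains seen0 d = false ∧ landCell land d.1 d.2 = 1
    · have hstep : dfsStepB land n m (q0, seen0) d =
          (q0 ++ [d], PySem.Set.add seen0 d) := by
        simp only [dfsStepB]; rw [if_pos hcond]
      rw [hstep]
      have hgd : good land n m d = true := by
        simp only [good, decide_eq_true_iff]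
        exact ⟨hcond.1, hcond.2.1, hcond.2.2.1, hcond.2.2.2.1, hcond.2.2.2.2.2⟩
      have hdns : d ∉ seen0 := (setContains_false_iff seen0 d).mp hcond.2.2.2.2.1
      have hnd1 : (PySem.Set.add seen0 d).Nodup := setAdd_nodup seen0 d hnd
      have hsg1 : ∀ c ∈ PySem.Set.add seen0 d, good land n m c = true := by
        intro c hc
        rcases (PySem.Set.mem_add seen0 d c).mp hc with hc | rfl
        · exact hsg c hc
        · exact hgd
      obtain ⟨new', h1, h2, h3, h4, h5, h6, h7⟩ := ih (q0 ++ [d]) _ hnd1 hsg1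
      have hT : (PySem.Set.add seen0 d).toFinset = insert d seen0.toFinset :=
        setAdd_toFinset seen0 d
      refine ⟨d :: new', by simpa [List.append_assoc] using h1, h2, h3, ?_, ?_, ?_, ?_⟩
      · refine List.nodup_cons.mpr ⟨fun hmem => ?_, h4⟩
        have := (h5 d hmem).2.2
        rw [hT] at this
        exact this (Finset.mem_insert_self _ _)
      · intro d' hd'
        rcases List.mem_cons.mp hd' with rfl | hd''
        · exact ⟨List.mem_cons_self, hgd, by simpa using hdns⟩
        · obtain ⟨hdns', hg', hnm'⟩ := h5 d' hd''
          refine ⟨List.mem_cons_of_mem _ hdns', hg', fun hmm => ?_⟩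
          exact hnm' (by rw [hT]; exact Finset.mem_insert_of_mem hmm)
      · rw [h6, hT]; ext a; simp; try tauto
      · intro d' hd' hg'
        rcases List.mem_cons.mp hd' with rfl | hd''
        · rw [h6, hT]
          exact Finset.mem_union_left _ (Finset.mem_insert_self _ _)
        · exact h7 d' hd'' hg'
    · have hstep : dfsStepB land n m (q0, seen0) d = (q0, seen0) := by
        simp only [dfsStepB]; rw [if_neg hcond]
      rw [hstep]
      obtain ⟨new', h1, h2, h3, h4, h5, h6, h7⟩ := ih q0 seen0 hnd hsg
      refine ⟨new', h1, h2, h3, h4, ?_, h6, ?_⟩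
      · intro d' hd'
        obtain ⟨hdns', hg', hnm'⟩ := h5 d' hd'
        exact ⟨List.mem_cons_of_mem _ hdns', hg', hnm'⟩
      · intro d' hd' hg'
        rcases List.mem_cons.mp hd' with rfl | hd''
        · have hb := (decide_eq_true_iff).mp hg'
          have hmem : d' ∈ seen0 := by
            by_contra hk
            exact hcond ⟨hb.1, hb.2.1, hb.2.2.1, hb.2.2.2.1,
              (setContains_false_iff seen0 d').mpr hk, by simpa using hb.2.2.2.2⟩
          rw [h6]
          exact Finset.mem_union_left _ (List.mem_toFinset.mpr hmem)
        · exact h7 d' hd'' hg'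

lemma dfsLoopB_spec (land : List (List Int)) (n m : Int) (fuel : Nat)
    (q : List (Int × Int)) (seen : PySem.Set (Int × Int)) (comp : List (Int × Int))
    (hnd : seen.Nodup)
    (hsg : ∀ c ∈ seen, good land n m c = true)
    (hqg : ∀ c ∈ q, good land n m c = true)
    (hqm : ∀ c ∈ q, c ∈ seen.toFinset)
    (hqn : q.Nodup)
    (hcl : ∀ c ∈ seen.toFinset, c ∉ q → ∀ d ∈ nbrsB c.1 c.2,
      good land n m d = true → d ∈ seen.toFinset)
    (hfuel : 5 * ((goodF land n m \ seen.toFinset).card) + q.length ≤ fuel) :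
    (dfsLoopB land n m fuel q seen comp).2.Nodup ∧
    (∀ c ∈ (dfsLoopB land n m fuel q seen comp).2, good land n m c = true) ∧
    seen.toFinset ⊆ (dfsLoopB land n m fuel q seen comp).2.toFinset ∧
    (∀ c ∈ (dfsLoopB land n m fuel q seen comp).2.toFinset,
      ∀ d ∈ nbrsB c.1 c.2, good land n m d = true →
        d ∈ (dfsLoopB land n m fuel q seen comp).2.toFinset) ∧
    (∀ c ∈ (dfsLoopB land n m fuel q seen comp).2.toFinset,
      c ∈ seen.toFinset ∨ ∃ s ∈ q, Reach land n m seen.toFinset s c) ∧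
    ∃ tail : List (Int × Int),
      (dfsLoopB land n m fuel q seen comp).1 = comp ++ tail ∧
      tail.Nodup ∧
      tail.toFinset = q.toFinset ∪
        ((dfsLoopB land n m fuel q seen comp).2.toFinset \ seen.toFinset) ∧
      tail.length = q.length +
        ((dfsLoopB land n m fuel q seen comp).2.toFinset \ seen.toFinset).card := by
  induction fuel generalizing q seen comp with
  | zero =>
      have hq : q = [] := List.eq_nil_of_length_eq_zero (by omega)
      subst hq
      simp only [dfsLoopB]
      refine ⟨hnd, hsg, Finset.Subset.refl _, ?_, fun c hc => Or.inl hc,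
        [], by simp, by simp, by simp, by simp⟩
      intro c hc d hd hg
      exact hcl c hc (by simp) d hd hg
  | succ fuel ih =>
      match q with
      | [] =>
          simp only [dfsLoopB]
          refine ⟨hnd, hsg, Finset.Subset.refl _, ?_, fun c hc => Or.inl hc,
            [], by simp, by simp, by simp, by simp⟩
          intro c hc d hd hg
          exact hcl c hc (by simp) d hd hg
      | s :: ss =>
          simp only [dfsLoopB]
          set c := (s :: ss).getLast (List.cons_ne_nil s ss) with hc
          set rest := (s :: ss).dropLast with hrest
          have heq : rest ++ [c] = s :: ss := by
            rw [hrest, hc]; exact List.dropLast_append_getLast (List.cons_ne_nil s ss)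
          have hqn2 : (rest ++ [c]).Nodup := by rw [heq]; exact hqn
          have hrn : rest.Nodup := (List.nodup_append.mp hqn2).1
          have hcr : c ∉ rest := by
            intro hm
            have := (List.nodup_append.mp hqn2).2.2
            exact this c hm c (List.mem_singleton_self c) rfl
          have hcq : c ∈ s :: ss := by rw [← heq]; exact List.mem_append_right _ (by simp)
          have hrq : ∀ a ∈ rest, a ∈ s :: ss := by
            intro a ha; rw [← heq]; exact List.mem_append_left _ ha
          obtain ⟨new, h1, h2, h3, h4, h5, h6, h7⟩ :=
            foldStepB_spec land n m (nbrsB c.1 c.2) rest seen hnd hsg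
          set st := (nbrsB c.1 c.2).foldl (dfsStepB land n m) (rest, seen) with hst
          rw [h1]
          have hMsub : seen.toFinset ⊆ st.2.toFinset := by
            rw [h6]; exact Finset.subset_union_left
          have hnewM : ∀ d ∈ new, d ∈ st.2.toFinset := by
            intro d hd; rw [h6]
            exact Finset.mem_union_right _ (List.mem_toFinset.mpr hd)
          have hcM : c ∈ st.2.toFinset := hMsub (hqm c hcq)
          have hqn' : (rest ++ new).Nodup := by
            rw [List.nodup_append]
            refine ⟨hrn, h4, ?_⟩
            intro a ha b hb
            rintro rfl
            exact (h5 a hb).2.2 (hqm a (hrq a ha))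
          have hnsub : new.toFinset ⊆ goodF land n m \ seen.toFinset := by
            intro d hd
            rw [List.mem_toFinset] at hd
            exact Finset.mem_sdiff.mpr ⟨mem_goodF.mpr (h5 d hd).2.1, (h5 d hd).2.2⟩
          have hsd : goodF land n m \ st.2.toFinset =
              (goodF land n m \ seen.toFinset) \ new.toFinset := by
            rw [h6]; ext a
            simp only [Finset.mem_sdiff, Finset.mem_union, List.mem_toFinset]
            tauto
          have hcard : (goodF land n m \ st.2.toFinset).card + new.length =
              (goodF land n m \ seen.toFinset).card := by
            rw [hsd, Finset.card_sdiff, Finset.inter_eq_left.mpr hnsub,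
              List.toFinset_card_of_nodup h4]
            have := Finset.card_le_card hnsub
            rw [List.toFinset_card_of_nodup h4] at this
            omega
          have hlen : (s :: ss).length = rest.length + 1 := by
            rw [← heq]; simp
          have hfuel' : 5 * ((goodF land n m \ st.2.toFinset).card) +
              (rest ++ new).length ≤ fuel := by
            rw [List.length_append]
            omega
          obtain ⟨g1, g2, g3, g4, g5, tail', gt1, gt2, gt3, gt4⟩ :=
            ih (rest ++ new) st.2 (comp ++ [c]) h2 h3
              (by
                intro d hd
                rcases List.mem_append.mp hd with hd | hd
                · exact hqg d (hrq d hd)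
                · exact (h5 d hd).2.1)
              (by
                intro d hd
                rcases List.mem_append.mp hd with hd | hd
                · exact hMsub (hqm d (hrq d hd))
                · exact hnewM d hd)
              hqn'
              (by
                intro cM hcMm hcMq d hd hg
                rw [h6] at hcMm
                rcases Finset.mem_union.mp hcMm with hcMm | hcMm
                · by_cases hcc : cM = c
                  · subst hcc
                    exact h7 d hd hg
                  · have hns : cM ∉ s :: ss := by
                      rw [← heq]
                      intro hm
                      rcases List.mem_append.mp hm with h | h
                      · exact hcMq (List.mem_append_left _ h)
                      · exact hcc (List.mem_singleton.mp h)
                    exact hMsub (hcl cM hcMm hns d hd hg)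
                · exact absurd (List.mem_append_right _ (List.mem_toFinset.mp hcMm)) hcMq)
              hfuel'
          set MF := (dfsLoopB land n m fuel (rest ++ new) st.2 (comp ++ [c])).2.toFinset
            with hMF
          have hM1F : st.2.toFinset ⊆ MF := g3
          have hdecomp : MF \ seen.toFinset =
              (MF \ st.2.toFinset) ∪ new.toFinset := by
            ext a
            simp only [Finset.mem_sdiff, Finset.mem_union]
            constructor
            · intro ⟨haF, ha0⟩
              by_cases hn : a ∈ new.toFinset
              · exact Or.inr hn
              · refine Or.inl ⟨haF, fun hm => ?_⟩
                rw [h6] at hm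
                rcases Finset.mem_union.mp hm with hm | hm
                · exact ha0 hm
                · exact hn hm
            · rintro (⟨haF, ha1⟩ | hn)
              · exact ⟨haF, fun hm => ha1 (hMsub hm)⟩
              · refine ⟨hM1F (hnewM a (List.mem_toFinset.mp hn)), ?_⟩
                exact (h5 a (List.mem_toFinset.mp hn)).2.2
          have hdisj : Disjoint (MF \ st.2.toFinset) new.toFinset := by
            rw [Finset.disjoint_right]
            intro a ha
            rw [List.mem_toFinset] at ha
            simp only [Finset.mem_sdiff, not_and, not_not]
            intro _
            exact hnewM a ha
          have hcard2 : (MF \ seen.toFinset).card =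
              (MF \ st.2.toFinset).card + new.length := by
            rw [hdecomp, Finset.card_union_of_disjoint hdisj, List.toFinset_card_of_nodup h4]
          refine ⟨g1, g2, fun a ha => hM1F (hMsub ha), g4, ?_, c :: tail', ?_, ?_, ?_, ?_⟩
          · intro cF hcF
            rcases g5 cF hcF with hcF1 | ⟨sC, hs, hreach⟩
            · rw [h6] at hcF1
              rcases Finset.mem_union.mp hcF1 with h | h
              · exact Or.inl h
              · refine Or.inr ⟨c, hcq, ?_⟩
                rw [List.mem_toFinset] at h
                exact Relation.ReflTransGen.single ⟨(h5 _ h).1, (h5 _ h).2.1, (h5 _ h).2.2⟩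
            · have hreach0 : Reach land n m seen.toFinset sC cF := Reach_mono hMsub hreach
              rcases List.mem_append.mp hs with hs | hs
              · exact Or.inr ⟨sC, hrq sC hs, hreach0⟩
              · exact Or.inr ⟨c, hcq, Relation.ReflTransGen.head
                  ⟨(h5 _ hs).1, (h5 _ hs).2.1, (h5 _ hs).2.2⟩ hreach0⟩
          · rw [gt1]; simp [List.append_assoc]
          · refine List.nodup_cons.mpr ⟨fun hmem => ?_, gt2⟩
            rw [← List.mem_toFinset, gt3] at hmem
            rcases Finset.mem_union.mp hmem with h | h
            · rw [List.mem_toFinset] at h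
              rcases List.mem_append.mp h with h | h
              · exact hcr h
              · exact (h5 c h).2.2 (hqm c hcq)
            · exact (Finset.mem_sdiff.mp h).2 (hMsub (hqm c hcq))
          · ext a
            rw [List.toFinset_cons]
            simp only [Finset.mem_insert, Finset.mem_union, Finset.mem_sdiff]
            constructor
            · rintro (rfl | h)
              · exact Or.inl (List.mem_toFinset.mpr hcq)
              · rw [gt3] at h
                rcases Finset.mem_union.mp h with h | h
                · rw [List.mem_toFinset, List.mem_append] at h
                  rcases h with h | h
                  · exact Or.inl (List.mem_toFinset.mpr (hrq a h))
                  · exact Or.inr ⟨hM1F (hnewM a h), (h5 a h).2.2⟩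
                · obtain ⟨ha1, ha2⟩ := Finset.mem_sdiff.mp h
                  exact Or.inr ⟨ha1, fun hm => ha2 (hMsub hm)⟩
            · rintro (h | ⟨hmF, hm0⟩)
              · rw [List.mem_toFinset, ← heq, List.mem_append] at h
                rcases h with h | h
                · refine Or.inr ?_
                  rw [gt3]
                  exact Finset.mem_union_left _
                    (List.mem_toFinset.mpr (List.mem_append_left _ h))
                · exact Or.inl (List.mem_singleton.mp h)
              · have hsplit : a ∈ (MF \ st.2.toFinset) ∪ new.toFinset := by
                  rw [← hdecomp]; exact Finset.mem_sdiff.mpr ⟨hmF, hm0⟩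
                rcases Finset.mem_union.mp hsplit with h | h
                · exact Or.inr (by rw [gt3]; exact Finset.mem_union_right _ h)
                · refine Or.inr ?_
                  rw [gt3]
                  exact Finset.mem_union_left _ (List.mem_toFinset.mpr
                    (List.mem_append_right _ (List.mem_toFinset.mp h)))
          · rw [List.length_cons, gt4, List.length_append, hcard2, hlen]
            omega

lemma reach_closed (land : List (List Int)) (n m : Int) (M0 Z : Finset (Int × Int))
    (hZc : ∀ c ∈ Z, ∀ d ∈ nbrsB c.1 c.2, good land n m d = true → d ∈ Z)
    {s c : Int × Int} (hs : s ∈ Z) (hr : Reach land n m M0 s c) : c ∈ Z := by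
  induction hr with
  | refl => exact hs
  | tail _ hstep ih => exact hZc _ ih _ hstep.1 hstep.2.1

lemma closure_unique (land : List (List Int)) (n m : Int) (M0 X Y : Finset (Int × Int))
    (q : List (Int × Int)) (hq : ∀ c ∈ q, c ∈ M0)
    (hX0 : M0 ⊆ X) (hY0 : M0 ⊆ Y)
    (hXc : ∀ c ∈ X, ∀ d ∈ nbrsB c.1 c.2, good land n m d = true → d ∈ X)
    (hYc : ∀ c ∈ Y, ∀ d ∈ nbrsB c.1 c.2, good land n m d = true → d ∈ Y)
    (hXr : ∀ c ∈ X, c ∈ M0 ∨ ∃ s ∈ q, Reach land n m M0 s c)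
    (hYr : ∀ c ∈ Y, c ∈ M0 ∨ ∃ s ∈ q, Reach land n m M0 s c) : X = Y := by
  apply Finset.Subset.antisymm
  · intro c hc
    rcases hXr c hc with h | ⟨s, hs, hr⟩
    · exact hY0 h
    · exact reach_closed land n m M0 Y hYc (hY0 (hq s hs)) hr
  · intro c hc
    rcases hYr c hc with h | ⟨s, hs, hr⟩
    · exact hX0 h
    · exact reach_closed land n m M0 X hXc (hX0 (hq s hs)) hr

lemma pyGetD_pySetD_int (co : List Int) (x k v : Int) (hx : 0 ≤ x)
    (hxl : x < (co.length : Int)) (hk : 0 ≤ k) :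
    PySem.List.pyGetD (PySem.List.pySetD co x v) k 0 =
      if k = x then v else PySem.List.pyGetD co k 0 := by
  rw [PySem.List.pySetD_of_nonneg _ _ hx, PySem.List.pyGetD_of_nonneg _ _ hk,
    PySem.List.pyGetD_of_nonneg _ _ hk, getD_set_helper]
  by_cases h : k = x
  · subst h
    rw [if_pos ⟨rfl, by omega⟩, if_pos rfl]
  · have : ¬(k.toNat = x.toNat ∧ x.toNat < co.length) := by
      intro hh; exact h (by omega)
    rw [if_neg this, if_neg h]

lemma colsFoldA_len (size : Int) (cols : List Int) (co : List Int) :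
    (cols.foldl (fun co col =>
      PySem.List.pySetD co col (PySem.List.pyGetD co col 0 + size)) co).length = co.length := by
  induction cols generalizing co with
  | nil => rfl
  | cons col t ih => rw [List.foldl_cons, ih, PySem.List.length_pySetD]

lemma colsFoldA_getD (size : Int) (cols : List Int) (hnd : cols.Nodup) (co : List Int)
    (hin : ∀ col ∈ cols, 0 ≤ col ∧ col < (co.length : Int)) (k : Int) (hk : 0 ≤ k) :
    PySem.List.pyGetD (cols.foldl (fun co col =>
      PySem.List.pySetD co col (PySem.List.pyGetD co col 0 + size)) co) k 0 =
      PySem.List.pyGetD co k 0 + (if k ∈ cols then size else 0) := by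
  induction cols generalizing co with
  | nil => simp
  | cons col t ih =>
      rw [List.foldl_cons]
      have hcol := hin col List.mem_cons_self
      have hlen : ((PySem.List.pySetD co col (PySem.List.pyGetD co col 0 + size)).length : Int)
          = (co.length : Int) := by rw [PySem.List.length_pySetD]
      rw [ih (List.nodup_cons.mp hnd).2 _
        (fun c hc => by rw [hlen]; exact hin c (List.mem_cons_of_mem _ hc)) ]
      rw [pyGetD_pySetD_int co col k _ hcol.1 hcol.2 hk]
      by_cases hkc : k = col
      · subst hkc
        have : k ∉ t := (List.nodup_cons.mp hnd).1
        simp [this]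
      · simp [hkc, List.mem_cons]

lemma colsFoldB_getD (size : Int) (cols : List Int) (hnd : cols.Nodup)
    (d : PySem.Dict Int Int) (k : Int) :
    (cols.foldl (fun d col => d.modify col 0 (· + size)) d).getD k 0 =
      d.getD k 0 + (if k ∈ cols then size else 0) := by
  induction cols generalizing d with
  | nil => simp
  | cons col t ih =>
      rw [List.foldl_cons, ih (List.nodup_cons.mp hnd).2]
      rw [PySem.Dict.getD_modify]
      by_cases hkc : k = col
      · subst hkc
        have : k ∉ t := (List.nodup_cons.mp hnd).1
        simp [this]
      · simp [hkc, List.mem_cons]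

lemma setAdd_of_mem {α : Type} [BEq α] [LawfulBEq α] (s : PySem.Set α) (x : α)
    (h : x ∈ s) : PySem.Set.add s x = s := by
  simp [PySem.Set.add, PySem.Set.contains, h]

lemma setUpdate_of_subset {α : Type} [BEq α] [LawfulBEq α] (s : PySem.Set α) (l : List α)
    (h : ∀ x ∈ l, x ∈ s) : PySem.Set.update s l = s := by
  induction l generalizing s with
  | nil => rfl
  | cons x t ih =>
      have hx : PySem.Set.add s x = s := setAdd_of_mem s x (h x List.mem_cons_self)
      calc PySem.Set.update s (x :: t) = PySem.Set.update (PySem.Set.add s x) t := by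
            simp [PySem.Set.update]
        _ = PySem.Set.update s t := by rw [hx]
        _ = s := ih s (fun y hy => h y (List.mem_cons_of_mem _ hy))

lemma colsFoldB_keys (size : Int) (cols : List Int) (d : PySem.Dict Int Int)
    (hsub : ∀ c ∈ cols, c ∈ d.keys) :
    (cols.foldl (fun d col => d.modify col 0 (· + size)) d).keys = d.keys := by
  have h : (cols.foldl (fun d col => d.modify col 0 (· + size)) d).keys =
      PySem.Set.update d.keys cols :=
    PySem.Dict.keys_foldl_modify cols (0 : Int) (fun _ _ => (· + size)) d
  rw [h]
  exact setUpdate_of_subset d.keys cols hsub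

lemma insertZero_getD (l : List Int) (d : PySem.Dict Int Int)
    (hd : ∀ k : Int, d.getD k 0 = 0) (k : Int) :
    (l.foldl (fun d c => d.insert c 0) d).getD k 0 = 0 := by
  induction l generalizing d with
  | nil => exact hd k
  | cons c t ih =>
      rw [List.foldl_cons]
      refine ih _ (fun k' => ?_)
      by_cases h : k' = c
      · subst h; rw [PySem.Dict.getD_insert_self]
      · rw [PySem.Dict.getD_insert_of_ne _ _ _ h]
        exact hd k'

lemma insertZero_keys (l : List Int) (hnd : l.Nodup) :
    (l.foldl (fun d c => d.insert c 0) (PySem.Dict.empty : PySem.Dict Int Int)).keys = l := by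
  have h := PySem.Dict.items_foldl_insert_fresh l (fun a => a) (fun _ => (0 : Int))
    PySem.Dict.empty (by intro a _; rfl) (by simpa using hnd)
  have hk : (l.foldl (fun d c => d.insert c 0) (PySem.Dict.empty : PySem.Dict Int Int)).keys
      = ((l.foldl (fun d c => d.insert c 0) (PySem.Dict.empty : PySem.Dict Int Int)).items).map
        Prod.fst := rfl
  rw [hk, h]
  have : PySem.Dict.empty.items = ([] : List (Int × Int)) := rfl
  rw [this, List.nil_append]
  rw [List.map_map]
  have hid : (Prod.fst ∘ fun a : Int => (a, (0 : Int))) = id := rfl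
  rw [hid, List.map_id]

lemma ofList_toFinset {α : Type} [BEq α] [LawfulBEq α] [DecidableEq α] (l : List α) :
    (PySem.Set.ofList l).toFinset = l.toFinset := by
  ext a
  simp only [List.mem_toFinset]
  exact PySem.Set.mem_ofList l a

def OuterInv (land : List (List Int)) (n m : Int)
    (A : List Int × List (List Bool)) (B : PySem.Dict Int Int × PySem.Set (Int × Int)) : Prop :=
  Shaped n m A.2 ∧
  B.2.Nodup ∧
  (∀ c ∈ B.2, good land n m c = true) ∧
  mset land n m A.2 = B.2.toFinset ∧
  (∀ c ∈ B.2.toFinset, ∀ d ∈ nbrsB c.1 c.2, good land n m d = true → d ∈ B.2.toFinset) ∧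
  A.1.length = m.toNat ∧
  B.1.keys = PySem.List.pyRange 0 m 1 ∧
  (∀ k : Int, 0 ≤ k → B.1.getD k 0 = PySem.List.pyGetD A.1 k 0)

lemma cellStep (land : List (List Int)) (n m i j : Int)
    (A : List Int × List (List Bool)) (B : PySem.Dict Int Int × PySem.Set (Int × Int))
    (hInv : OuterInv land n m A B) (hn : n = (land.length : Int))
    (hi0 : 0 ≤ i) (hin : i < n) (hj0 : 0 ≤ j) (hjm : j < m) :
    OuterInv land n m (cellLoopA land n m i A j) (cellLoopB land n m i B j) := by
  obtain ⟨hSh, hBnd, hBg, hEq, hCl, hLen, hKeys, hVal⟩ := hInv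
  by_cases hL : landCell land i j = 1
  case neg =>
    rw [cellLoopA, if_neg (by intro h; exact hL h.1), cellLoopB, if_neg (by intro h; exact hL h.1)]
    exact ⟨hSh, hBnd, hBg, hEq, hCl, hLen, hKeys, hVal⟩
  case pos =>
  have hgood : good land n m (i, j) = true := by
    simp only [good, decide_eq_true_iff]
    exact ⟨hi0, hin, hj0, hjm, hL⟩
  by_cases hV : vGetA A.2 i j = false
  case neg =>
    -- already visited on the A side; hence contained in seen on the B side
    have hVt : vGetA A.2 i j = true := by
      rcases Bool.eq_false_or_eq_true (vGetA A.2 i j) with h | h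
      · exact h
      · exact absurd h hV
    have hmem : (i, j) ∈ mset land n m A.2 := mem_mset.mpr ⟨hgood, hVt⟩
    have hseen : (i, j) ∈ B.2 := by
      rw [hEq] at hmem; exact List.mem_toFinset.mp hmem
    have hcont : ¬ PySem.Set.contains B.2 (i, j) = false := by
      rw [setContains_false_iff]; exact fun h => h hseen
    rw [cellLoopA, if_neg (by intro h; exact hV h.2),
      cellLoopB, if_neg (by intro h; exact hcont h.2)]
    exact ⟨hSh, hBnd, hBg, hEq, hCl, hLen, hKeys, hVal⟩
  case pos =>
  have hnotm : (i, j) ∉ mset land n m A.2 := by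
    rw [mem_mset]; rintro ⟨-, hvv⟩; rw [hV] at hvv; cases hvv
  have hnseen : (i, j) ∉ B.2 := by
    rw [← List.mem_toFinset, ← hEq]; exact hnotm
  have hcont : PySem.Set.contains B.2 (i, j) = false := (setContains_false_iff _ _).mpr hnseen
  rw [cellLoopA, if_pos ⟨hL, hV⟩, cellLoopB, if_pos ⟨hL, hcont⟩]
  simp only [bfsA]
  -- the two inner searches explore the same component
  have hSh1 : Shaped n m (vSetA A.2 i j) := Shaped_vSetA hSh hi0 hin
  have hM1 : mset land n m (vSetA A.2 i j) = insert (i, j) (mset land n m A.2) := by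
    have := mset_vSetA (land := land) hSh (x := i) (y := j) hgood
    simpa using this
  have hT : (PySem.Set.add B.2 (i, j)).toFinset = insert (i, j) B.2.toFinset :=
    setAdd_toFinset B.2 (i, j)
  have hM01 : mset land n m (vSetA A.2 i j) = (PySem.Set.add B.2 (i, j)).toFinset := by
    rw [hM1, hT, hEq]
  have hcard0 : (goodF land n m \ mset land n m (vSetA A.2 i j)).card ≤
      land.length * m.toNat := by
    have h1 : (goodF land n m \ mset land n m (vSetA A.2 i j)).card ≤
        (goodF land n m).card := Finset.card_le_card (Finset.sdiff_subset)
    have h3 : n.toNat = land.length := by omega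
    calc (goodF land n m \ mset land n m (vSetA A.2 i j)).card
        ≤ (goodF land n m).card := h1
      _ ≤ n.toNat * m.toNat := card_goodF_le land n m
      _ = land.length * m.toNat := by rw [h3]
  have hclA : ∀ c ∈ mset land n m (vSetA A.2 i j), c ∉ [(i, j)] →
      ∀ d ∈ nbrsB c.1 c.2, good land n m d = true →
        d ∈ mset land n m (vSetA A.2 i j) := by
    intro c hcm hcq d hd hg
    rw [hM1] at hcm ⊢
    rcases Finset.mem_insert.mp hcm with h | hcm
    · exact absurd (by rw [h]; exact List.mem_singleton_self _) hcq
    · rw [hEq] at hcm ⊢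
      exact Finset.mem_insert_of_mem (hCl c hcm d hd hg)
  obtain ⟨a1, a2, a3, a4, a5, a6, a7⟩ :=
    bfsLoopA_spec land n m (5 * (land.length * m.toNat) + 1) [(i, j)] (vSetA A.2 i j) 0
      (PySem.Set.ofList [j]) hSh1
      (by intro c hc; rw [List.mem_singleton] at hc; subst hc; exact hgood)
      (by
        intro c hc; rw [List.mem_singleton] at hc; subst hc
        refine mem_mset.mpr ⟨hgood, ?_⟩
        rw [vGetA_vSetA hSh hi0 hin hj0 hjm hi0 hj0]
        simp)
      (List.nodup_singleton _)
      (by simpa using PySem.Set.nodup_ofList [j])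
      hclA
      (by simp only [List.length_singleton]; omega)
  obtain ⟨b1, b2, b3, b4, b5, tail, bt1, bt2, bt3, bt4⟩ :=
    dfsLoopB_spec land n m (5 * (land.length * m.toNat) + 1) [(i, j)]
      (PySem.Set.add B.2 (i, j)) []
      (setAdd_nodup _ _ hBnd)
      (by
        intro c hc
        rcases (PySem.Set.mem_add B.2 (i, j) c).mp hc with hc | rfl
        · exact hBg c hc
        · exact hgood)
      (by intro c hc; rw [List.mem_singleton] at hc; subst hc; exact hgood)
      (by
        intro c hc; rw [List.mem_singleton] at hc; subst hc
        rw [hT]; exact Finset.mem_insert_self _ _)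
      (List.nodup_singleton _)
      (by
        intro c hcm hcq d hd hg
        rw [hT] at hcm ⊢
        rcases Finset.mem_insert.mp hcm with h | hcm
        · exact absurd (by rw [h]; exact List.mem_singleton_self _) hcq
        · exact Finset.mem_insert_of_mem (hCl c hcm d hd hg))
      (by
        rw [← hM01]
        simp only [List.length_singleton]
        omega)
  -- name the two search results
  rw [← hM01] at b3 b5 bt3 bt4
  have hXY : mset land n m (bfsLoopA land n m (5 * (land.length * m.toNat) + 1) [(i, j)]
      (vSetA A.2 i j) 0 (PySem.Set.ofList [j])).2.2 =
      (dfsLoopB land n m (5 * (land.length * m.toNat) + 1) [(i, j)]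
        (PySem.Set.add B.2 (i, j)) []).2.toFinset := by
    apply closure_unique land n m (mset land n m (vSetA A.2 i j)) _ _ [(i, j)]
    · intro c hc; rw [List.mem_singleton] at hc; subst hc
      refine mem_mset.mpr ⟨hgood, ?_⟩
      rw [vGetA_vSetA hSh hi0 hin hj0 hjm hi0 hj0]
      simp
    · exact a2
    · exact b3
    · exact a3
    · exact b4
    · exact a4
    · exact b5
  have hAlen : ((A.1.length : Int)) = m := by omega
  have hrange : ∀ col ∈ (bfsLoopA land n m (5 * (land.length * m.toNat) + 1) [(i, j)]
      (vSetA A.2 i j) 0 (PySem.Set.ofList [j])).2.1, 0 ≤ col ∧ col < (A.1.length : Int) := by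
    intro col hcol
    rw [← List.mem_toFinset, a7] at hcol
    rcases Finset.mem_union.mp hcol with h | h
    · have : col = j := by
        have : col ∈ [j] := List.mem_toFinset.mp (by simpa using h)
        simpa using this
      subst this
      exact ⟨hj0, by omega⟩
    · obtain ⟨c, hc, rfl⟩ := Finset.mem_image.mp h
      have hcg : c ∈ goodF land n m := mset_subset_goodF (Finset.mem_sdiff.mp hc).1
      have := (decide_eq_true_iff).mp (mem_goodF.mp hcg)
      exact ⟨this.2.2.1, by omega⟩
  have hsz : (bfsLoopA land n m (5 * (land.length * m.toNat) + 1) [(i, j)]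
      (vSetA A.2 i j) 0 (PySem.Set.ofList [j])).1 =
      (((dfsLoopB land n m (5 * (land.length * m.toNat) + 1) [(i, j)]
        (PySem.Set.add B.2 (i, j)) []).1.length : Int)) := by
    rw [bt1, List.nil_append, a5, bt4, hXY]
    push_cast
    ring
  have hcolsFin : (bfsLoopA land n m (5 * (land.length * m.toNat) + 1) [(i, j)]
      (vSetA A.2 i j) 0 (PySem.Set.ofList [j])).2.1.toFinset =
      (PySem.Set.ofList (((dfsLoopB land n m (5 * (land.length * m.toNat) + 1) [(i, j)]
        (PySem.Set.add B.2 (i, j)) []).1).map Prod.snd)).toFinset := by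
    rw [a7, bt1, List.nil_append, ofList_toFinset, ofList_toFinset, map_toFinset, bt3, hXY,
      Finset.image_union]
    ext a
    simp
  have hmemIff : ∀ k : Int, (k ∈ (bfsLoopA land n m (5 * (land.length * m.toNat) + 1) [(i, j)]
      (vSetA A.2 i j) 0 (PySem.Set.ofList [j])).2.1 ↔
      k ∈ PySem.Set.ofList (((dfsLoopB land n m (5 * (land.length * m.toNat) + 1) [(i, j)]
        (PySem.Set.add B.2 (i, j)) []).1).map Prod.snd)) := by
    intro k
    rw [← List.mem_toFinset, ← List.mem_toFinset, hcolsFin]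
  refine ⟨a1, b1, b2, hXY, b4, ?_, ?_, ?_⟩
  · dsimp only
    rw [colsFoldA_len]
    exact hLen
  · dsimp only
    rw [← hKeys]
    apply colsFoldB_keys
    intro c hc
    rw [hKeys, PySem.List.mem_pyRange_one]
    have := hrange c ((hmemIff c).mpr hc)
    omega
  · intro k hk
    dsimp only
    rw [colsFoldB_getD _ _ (PySem.Set.nodup_ofList _),
      colsFoldA_getD _ _ a6 _ hrange k hk, hVal k hk, hsz]
    congr 1
    by_cases hmem : k ∈ (bfsLoopA land n m (5 * (land.length * m.toNat) + 1) [(i, j)]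
        (vSetA A.2 i j) 0 (PySem.Set.ofList [j])).2.1
    · rw [if_pos hmem, if_pos ((hmemIff k).mp hmem)]
    · rw [if_neg hmem, if_neg (fun h => hmem ((hmemIff k).mpr h))]

lemma rowFold (land : List (List Int)) (n m i : Int)
    (A : List Int × List (List Bool)) (B : PySem.Dict Int Int × PySem.Set (Int × Int))
    (hInv : OuterInv land n m A B) (hn : n = (land.length : Int))
    (hi0 : 0 ≤ i) (hin : i < n) (js : List Int) (hjs : ∀ j ∈ js, 0 ≤ j ∧ j < m) :
    OuterInv land n m (js.foldl (cellLoopA land n m i) A) (js.foldl (cellLoopB land n m i) B) := by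
  induction js generalizing A B with
  | nil => exact hInv
  | cons j t ih =>
      rw [List.foldl_cons, List.foldl_cons]
      have hj := hjs j List.mem_cons_self
      exact ih _ _ (cellStep land n m i j A B hInv hn hi0 hin hj.1 hj.2)
        (fun j' hj' => hjs j' (List.mem_cons_of_mem _ hj'))

lemma gridFold (land : List (List Int)) (n m : Int)
    (A : List Int × List (List Bool)) (B : PySem.Dict Int Int × PySem.Set (Int × Int))
    (hInv : OuterInv land n m A B) (hn : n = (land.length : Int))
    (is : List Int) (his : ∀ i ∈ is, 0 ≤ i ∧ i < n) :
    OuterInv land n m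
      (is.foldl (fun st i => (PySem.List.pyRange 0 m 1).foldl (cellLoopA land n m i) st) A)
      (is.foldl (fun st i => (PySem.List.pyRange 0 m 1).foldl (cellLoopB land n m i) st) B) := by
  induction is generalizing A B with
  | nil => exact hInv
  | cons i t ih =>
      rw [List.foldl_cons, List.foldl_cons]
      have hi := his i List.mem_cons_self
      refine ih _ _ (rowFold land n m i A B hInv hn hi.1 hi.2 _ ?_)
        (fun i' hi' => his i' (List.mem_cons_of_mem _ hi'))
      intro j hj
      rw [PySem.List.mem_pyRange_one] at hj
      exact hj

lemma initInv (land : List (List Int)) (n m : Int) (hn : n = (land.length : Int))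
    (hm : 0 ≤ m) :
    OuterInv land n m
      (List.replicate m.toNat 0, List.replicate n.toNat (List.replicate m.toNat false))
      ((PySem.List.pyRange 0 m 1).foldl (fun d c => d.insert c 0) PySem.Dict.empty,
        PySem.Set.empty) := by
  have hvget : ∀ x y : Int, 0 ≤ x → 0 ≤ y →
      vGetA (List.replicate n.toNat (List.replicate m.toNat false)) x y = false := by
    intro x y hx hy
    rw [vGetA, PySem.List.pyGetD_of_nonneg _ _ hx, PySem.List.pyGetD_of_nonneg _ _ hy]
    by_cases hxn : x.toNat < n.toNat
    · have hrow : (List.replicate n.toNat (List.replicate m.toNat false)).getD x.toNat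
          ([] : List Bool) = List.replicate m.toNat false := by
        rw [List.getD_eq_getElem?_getD, List.getElem?_replicate]
        simp [hxn]
      rw [hrow, List.getD_eq_getElem?_getD, List.getElem?_replicate]
      by_cases hym : y.toNat < m.toNat
      · simp [hym]
      · simp [hym]
    · have hrow : (List.replicate n.toNat (List.replicate m.toNat false)).getD x.toNat
          ([] : List Bool) = [] := by
        rw [List.getD_eq_getElem?_getD, List.getElem?_replicate]
        simp [hxn]
      rw [hrow]
      simp
  refine ⟨⟨by simp, ?_⟩, List.nodup_nil, by simp [PySem.Set.empty], ?_, by simp [PySem.Set.empty], by simp, ?_, ?_⟩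
  · intro row hrow
    rw [List.eq_of_mem_replicate hrow]
    simp
  · ext c
    simp only [mem_mset]
    constructor
    · rintro ⟨hg, hv⟩
      have hb := (decide_eq_true_iff).mp hg
      rw [hvget c.1 c.2 hb.1 hb.2.2.1] at hv
      cases hv
    · intro hc
      simp only [PySem.Set.empty] at hc
      simp at hc
  · exact insertZero_keys _ (PySem.List.nodup_pyRange_one 0 m)
  · intro k hk
    rw [insertZero_getD _ _ (fun k' => rfl) k]
    rw [PySem.List.pyGetD_of_nonneg _ _ hk, List.getD_eq_getElem?_getD, List.getElem?_replicate]
    by_cases h : k.toNat < m.toNat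
    · simp [h]
    · simp [h]

lemma values_eq_finish (m : Int) (FA : List Int) (FB : PySem.Dict Int Int)
    (hLen : FA.length = m.toNat) (hKeys : FB.keys = PySem.List.pyRange 0 m 1)
    (hVal : ∀ k : Int, 0 ≤ k → FB.getD k 0 = PySem.List.pyGetD FA k 0)
    (hm : 0 ≤ m) : FB.values = FA := by
  rw [PySem.Dict.values_eq_map_keys _
    (by rw [hKeys]; exact PySem.List.nodup_pyRange_one 0 _) 0, hKeys]
  rw [List.map_congr_left (fun k hk =>
    hVal k ((PySem.List.mem_pyRange_one).mp hk).1)]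
  have hmm : m = PySem.List.len FA := by rw [PySem.List.len_eq]; omega
  rw [hmm]
  exact PySem.List.map_pyGetD_pyRange_zero _ 0

set_option maxHeartbeats 1000000 in
theorem solution_eq_alt (land : List (List Int)) : solution land = solution_alt land := by
  simp only [solution, solution_alt]
  obtain ⟨-, -, -, -, -, hLen, hKeys, hVal⟩ :=
    gridFold land (land.length : Int) ((PySem.List.pyGetD land 0 []).length : Int)
      _ _ (initInv land _ _ rfl (by positivity)) rfl
      (PySem.List.pyRange 0 (land.length : Int) 1)
      (by intro i hi; rw [PySem.List.mem_pyRange_one] at hi; exact hi)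
  rw [values_eq_finish _ _ _ hLen hKeys hVal (by positivity)]

-- ===== VERDICT (by name: the statement is the Claim_ definition above) =====
theorem solution_spec : Claim_equal_solution := by
  intro land _ _
  exact solution_eq_alt land
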